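-- pv_equiv track=rewrite | github.com/gouda64/neural-chain-preimage-attack | src/fuzzy/bytehash.py | sha256bytes
-- ===== SOURCE A (Python) =====
-- def int2bytes(x, n=4):
--     b = [0] * n
--     for i in range(n):
--         b[i] = x & 0xFF
--         x >>= 8
--     return b
--
-- def bytes2int(bytes):
--     s = 0
--     l = len(bytes)
--     for i in range(l):
--         s <<= 8
--         s += bytes[l-1-i]
--     return s
--
-- def lebe(bytes):
--     bytes = list(bytes) # copy
--     l = len(bytes)
--     for i in range(l >> 1):
--         bytes[i], bytes[l-1-i] = bytes[l-1-i], bytes[i]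
--     return bytes
--
-- def rotr(d, n):
--     return (d >> n) | ((d << (0x20 - n)) & 0xFFFFFFFF)
--
-- def sha256bytes(bytes, rounds=0x40):
--     ks = (0x428a2f98, 0x71374491, 0xb5c0fbcf, 0xe9b5dba5, 0x3956c25b, 0x59f111f1, 0x923f82a4, 0xab1c5ed5,
--           0xd807aa98, 0x12835b01, 0x243185be, 0x550c7dc3, 0x72be5d74, 0x80deb1fe, 0x9bdc06a7, 0xc19bf174,
--           0xe49b69c1, 0xefbe4786, 0x0fc19dc6, 0x240ca1cc, 0x2de92c6f, 0x4a7484aa, 0x5cb0a9dc, 0x76f988da,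
--           0x983e5152, 0xa831c66d, 0xb00327c8, 0xbf597fc7, 0xc6e00bf3, 0xd5a79147, 0x06ca6351, 0x14292967,
--           0x27b70a85, 0x2e1b2138, 0x4d2c6dfc, 0x53380d13, 0x650a7354, 0x766a0abb, 0x81c2c92e, 0x92722c85,
--           0xa2bfe8a1, 0xa81a664b, 0xc24b8b70, 0xc76c51a3, 0xd192e819, 0xd6990624, 0xf40e3585, 0x106aa070,
--           0x19a4c116, 0x1e376c08, 0x2748774c, 0x34b0bcb5, 0x391c0cb3, 0x4ed8aa4a, 0x5b9cca4f, 0x682e6ff3,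
--           0x748f82ee, 0x78a5636f, 0x84c87814, 0x8cc70208, 0x90befffa, 0xa4506ceb, 0xbef9a3f7, 0xc67178f2)
--
--     h0 = 0x6a09e667
--     h1 = 0xbb67ae85
--     h2 = 0x3c6ef372
--     h3 = 0xa54ff53a
--     h4 = 0x510e527f
--     h5 = 0x9b05688c
--     h6 = 0x1f83d9ab
--     h7 = 0x5be0cd19
--
--     msglen = len(bytes) << 3 # length in bits
--     bytes = list(bytes) # copy
--
--     bytes += [0x80]
--     bytes += [0] * ((0x38 - len(bytes)) & 0x3F)
--     bytes += lebe(int2bytes(msglen, 8)) # now len(bytes) mod 64 = 0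
--
--     n = len(bytes) >> 6
--
--     w = [0] * 0x40
--
--     for i in range(n):
--         a, b, c, d, e, f, g, h = h0, h1, h2, h3, h4, h5, h6, h7
--
--         chunk = bytes[(i<<6):((i+1)<<6)]
--
--         for j in range(min(0x40, rounds)):
--             if j >= 0x10:
--                 s = w[j-15]
--                 s0 = rotr(s, 7) ^ rotr(s, 18) ^ (s >> 3)
--                 s = w[j-2]
--                 s1 = rotr(s, 17) ^ rotr(s, 19) ^ (s >> 10)
--                 w[j] = (w[j-16] + s0 + w[j-7] + s1) & 0xFFFFFFFF
--             else:
--                 w[j] = bytes2int(lebe(chunk[(j<<2):((j+1)<<2)]))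
--
--             s1 = rotr(e, 6) ^ rotr(e, 11) ^ rotr(e, 25)
--             ch = (e & f) ^ ((~e) & g)
--             t1 = (h + s1 + ch + ks[j] + w[j]) & 0xFFFFFFFF
--             s0 = rotr(a, 2) ^ rotr(a, 13) ^ rotr(a, 22)
--             maj = (a & b) ^ (a & c) ^ (b & c)
--             t2 = (s0 + maj) & 0xFFFFFFFF
--
--             h, g, f, e, d, c, b, a = g, f, e, (d + t1) & 0xFFFFFFFF, c, b, a, (t1 + t2) & 0xFFFFFFFF
--
--         h0, h1, h2, h3, h4, h5, h6, h7 = (h0 + a) & 0xFFFFFFFF, (h1 + b) & 0xFFFFFFFF, (h2 + c) & 0xFFFFFFFF, (h3 + d) & 0xFFFFFFFF, (h4 + e) & 0xFFFFFFFF, (h5 + f) & 0xFFFFFFFF, (h6 + g) & 0xFFFFFFFF, (h7 + h) & 0xFFFFFFFF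
--
--     return lebe(int2bytes(h0)) + lebe(int2bytes(h1)) + lebe(int2bytes(h2)) + lebe(int2bytes(h3)) + lebe(int2bytes(h4)) + lebe(int2bytes(h5)) + lebe(int2bytes(h6)) + lebe(int2bytes(h7)) # concatenation
-- ===== SOURCE B (Python) =====
-- # B: build-then-consume decomposition — per chunk the full 64-entry message
-- # schedule is built first (4-byte word packing by recursion, extension via
-- # negative-index appends), then a separate recursion consumes the (k, w) pairs
-- # for the compression; the hash state is a list zipped for the final additions.
-- M = 0xFFFFFFFF
--
-- KS = (0x428a2f98, 0x71374491, 0xb5c0fbcf, 0xe9b5dba5, 0x3956c25b, 0x59f111f1, 0x923f82a4, 0xab1c5ed5,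
--       0xd807aa98, 0x12835b01, 0x243185be, 0x550c7dc3, 0x72be5d74, 0x80deb1fe, 0x9bdc06a7, 0xc19bf174,
--       0xe49b69c1, 0xefbe4786, 0x0fc19dc6, 0x240ca1cc, 0x2de92c6f, 0x4a7484aa, 0x5cb0a9dc, 0x76f988da,
--       0x983e5152, 0xa831c66d, 0xb00327c8, 0xbf597fc7, 0xc6e00bf3, 0xd5a79147, 0x06ca6351, 0x14292967,
--       0x27b70a85, 0x2e1b2138, 0x4d2c6dfc, 0x53380d13, 0x650a7354, 0x766a0abb, 0x81c2c92e, 0x92722c85,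
--       0xa2bfe8a1, 0xa81a664b, 0xc24b8b70, 0xc76c51a3, 0xd192e819, 0xd6990624, 0xf40e3585, 0x106aa070,
--       0x19a4c116, 0x1e376c08, 0x2748774c, 0x34b0bcb5, 0x391c0cb3, 0x4ed8aa4a, 0x5b9cca4f, 0x682e6ff3,
--       0x748f82ee, 0x78a5636f, 0x84c87814, 0x8cc70208, 0x90befffa, 0xa4506ceb, 0xbef9a3f7, 0xc67178f2)
--
-- def _rotr(d, n):
--     return (d >> n) | ((d << (0x20 - n)) & M)
--
-- def _be(x, n):
--     # the n big-endian bytes of x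
--     return [] if n == 0 else _be(x >> 8, n - 1) + [x & 0xFF]
--
-- def _words(c):
--     # pack every 4-byte group big-endian
--     if len(c) < 4:
--         return []
--     return [((c[0] * 256 + c[1]) * 256 + c[2]) * 256 + c[3]] + _words(c[4:])
--
-- def _extend(w):
--     # grow the 16 chunk words to the full 64-entry schedule
--     while len(w) < 0x40:
--         x, y = w[-15], w[-2]
--         s0 = _rotr(x, 7) ^ _rotr(x, 18) ^ (x >> 3)
--         s1 = _rotr(y, 17) ^ _rotr(y, 19) ^ (y >> 10)
--         w = w + [(w[-16] + s0 + w[-7] + s1) & M]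
--     return w
--
-- def _crunch(ks, w, st):
--     # one compression step per remaining round constant
--     if not ks:
--         return st
--     a, b, c, d, e, f, g, h = st
--     wv = w[0]
--     s1 = _rotr(e, 6) ^ _rotr(e, 11) ^ _rotr(e, 25)
--     ch = (e & f) ^ (~e & g)
--     t1 = (h + s1 + ch + ks[0] + wv) & M
--     s0 = _rotr(a, 2) ^ _rotr(a, 13) ^ _rotr(a, 22)
--     maj = (a & b) ^ (a & c) ^ (b & c)
--     t2 = (s0 + maj) & M
--     return _crunch(ks[1:], w[1:], ((t1 + t2) & M, a, b, c, (d + t1) & M, e, f, g))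
--
-- def sha256bytes(bytes, rounds=0x40):
--     data = bytes + [0x80] + [0] * ((-(len(bytes) + 9)) % 0x40) + _be(len(bytes) << 3, 8)
--     hs = [0x6a09e667, 0xbb67ae85, 0x3c6ef372, 0xa54ff53a,
--           0x510e527f, 0x9b05688c, 0x1f83d9ab, 0x5be0cd19]
--     steps = min(0x40, max(rounds, 0))
--     for off in range(0, len(data), 0x40):
--         w = _extend(_words(data[off:off + 0x40]))
--         v = _crunch(KS[:steps], w, (hs[0], hs[1], hs[2], hs[3], hs[4], hs[5], hs[6], hs[7]))
--         hs = [(p + q) & M for p, q in zip(hs, v)]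
--     return [b for x in hs for b in _be(x, 4)]
-- ===== Notes on version B (the rewrite author's own statement) =====
-- stated objective: alternative
-- what changed: B replaces A's single interleaved schedule-and-compress round loop and its lebe/int2bytes/bytes2int index pipeline by a build-then-consume decomposition: per chunk it first builds the complete 64-entry schedule (recursive 4-byte word packing, extension appending via negative indices), then a separate recursion consumes the round-constant list for the compression, with the hash state as a list zipped for the final additions and big-endian bytes produced by one recursive helper.
import Mathlib
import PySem

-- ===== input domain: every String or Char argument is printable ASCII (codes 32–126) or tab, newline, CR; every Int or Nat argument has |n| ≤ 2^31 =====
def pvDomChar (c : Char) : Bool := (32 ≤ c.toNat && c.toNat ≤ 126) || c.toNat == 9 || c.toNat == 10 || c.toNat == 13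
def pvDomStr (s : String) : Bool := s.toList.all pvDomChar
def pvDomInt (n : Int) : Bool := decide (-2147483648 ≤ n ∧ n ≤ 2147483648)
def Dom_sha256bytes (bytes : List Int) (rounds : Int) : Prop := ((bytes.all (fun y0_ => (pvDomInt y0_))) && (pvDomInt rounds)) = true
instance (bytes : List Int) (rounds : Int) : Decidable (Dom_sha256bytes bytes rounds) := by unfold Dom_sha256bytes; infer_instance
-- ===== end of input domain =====

-- B replaces A's interleaved schedule-and-compress chunk loop by a build-then-consume pair
-- (recursive big-endian word packing + schedule extension, then a separate compression
-- recursion over the round constants), with a list-of-8 hash state (objective: alternative).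


-- the SHA-256 round constants: the same literal tuple appears in Source A and Source B, shared here
def shaKs : List Int :=
  [0x428a2f98, 0x71374491, 0xb5c0fbcf, 0xe9b5dba5, 0x3956c25b, 0x59f111f1, 0x923f82a4, 0xab1c5ed5,
   0xd807aa98, 0x12835b01, 0x243185be, 0x550c7dc3, 0x72be5d74, 0x80deb1fe, 0x9bdc06a7, 0xc19bf174,
   0xe49b69c1, 0xefbe4786, 0x0fc19dc6, 0x240ca1cc, 0x2de92c6f, 0x4a7484aa, 0x5cb0a9dc, 0x76f988da,
   0x983e5152, 0xa831c66d, 0xb00327c8, 0xbf597fc7, 0xc6e00bf3, 0xd5a79147, 0x06ca6351, 0x14292967,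
   0x27b70a85, 0x2e1b2138, 0x4d2c6dfc, 0x53380d13, 0x650a7354, 0x766a0abb, 0x81c2c92e, 0x92722c85,
   0xa2bfe8a1, 0xa81a664b, 0xc24b8b70, 0xc76c51a3, 0xd192e819, 0xd6990624, 0xf40e3585, 0x106aa070,
   0x19a4c116, 0x1e376c08, 0x2748774c, 0x34b0bcb5, 0x391c0cb3, 0x4ed8aa4a, 0x5b9cca4f, 0x682e6ff3,
   0x748f82ee, 0x78a5636f, 0x84c87814, 0x8cc70208, 0x90befffa, 0xa4506ceb, 0xbef9a3f7, 0xc67178f2]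

-- rotr(d, n): Source A's rotr and Source B's _rotr have the identical body; every call site uses a
-- literal 0 < n < 32, where (32 - n).toNat and n.toNat are exact
def shaRotr (d n : Int) : Int :=
  PySem.Int.bor (d >>> n.toNat) (PySem.Int.band (d <<< (32 - n).toNat) 0xFFFFFFFF)

-- ===== PORT A =====
def int2bytesA (x n : Int) : List Int :=
  ((PySem.List.pyRange 0 n 1).foldl
    (fun (st : List Int × Int) (i : Int) =>
      (PySem.List.pySetD st.1 i (PySem.Int.band st.2 0xFF), st.2 >>> (8 : Nat)))
    (List.replicate n.toNat 0, x)).1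

def bytes2intA (bs : List Int) : Int :=
  let l : Int := bs.length
  (PySem.List.pyRange 0 l 1).foldl
    (fun (s i : Int) => (s <<< (8 : Nat)) + PySem.List.pyGetD bs (l - 1 - i) 0) 0

def lebeA (bs : List Int) : List Int :=
  let l : Int := bs.length
  (PySem.List.pyRange 0 (l >>> (1 : Nat)) 1).foldl
    (fun (b : List Int) (i : Int) =>
      let u := PySem.List.pyGetD b (l - 1 - i) 0
      let v := PySem.List.pyGetD b i 0
      PySem.List.pySetD (PySem.List.pySetD b i u) (l - 1 - i) v)
    bs

def sha256bytes (bytes : List Int) (rounds : Int) : List Int :=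
  let msglen : Int := (bytes.length : Int) <<< (3 : Nat)
  let bs := bytes ++ [0x80]
  let bs := bs ++ List.replicate (PySem.Int.band (0x38 - (bs.length : Int)) 0x3F).toNat 0
  let bs := bs ++ lebeA (int2bytesA msglen 8)
  let n : Int := (bs.length : Int) >>> (6 : Nat)
  let st :=
    (PySem.List.pyRange 0 n 1).foldl
      (fun (st : Int × Int × Int × Int × Int × Int × Int × Int × List Int) (i : Int) =>
        let (h0, h1, h2, h3, h4, h5, h6, h7, w) := st
        let chunk := PySem.List.slice bs (some (i <<< (6 : Nat))) (some ((i + 1) <<< (6 : Nat)))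
        let st2 :=
          (PySem.List.pyRange 0 (min 0x40 rounds) 1).foldl
            (fun (st2 : Int × Int × Int × Int × Int × Int × Int × Int × List Int) (j : Int) =>
              let (a, b, c, d, e, f, g, h, w) := st2
              let wj : Int :=
                if 0x10 ≤ j then
                  let s := PySem.List.pyGetD w (j - 15) 0
                  let s0 := PySem.Int.bxor (PySem.Int.bxor (shaRotr s 7) (shaRotr s 18)) (s >>> (3 : Nat))
                  let s' := PySem.List.pyGetD w (j - 2) 0
                  let s1 := PySem.Int.bxor (PySem.Int.bxor (shaRotr s' 17) (shaRotr s' 19)) (s' >>> (10 : Nat))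
                  PySem.Int.band (PySem.List.pyGetD w (j - 16) 0 + s0 + PySem.List.pyGetD w (j - 7) 0 + s1) 0xFFFFFFFF
                else
                  bytes2intA (lebeA (PySem.List.slice chunk (some (j <<< (2 : Nat))) (some ((j + 1) <<< (2 : Nat)))))
              let w := PySem.List.pySetD w j wj
              let s1 := PySem.Int.bxor (PySem.Int.bxor (shaRotr e 6) (shaRotr e 11)) (shaRotr e 25)
              let ch := PySem.Int.bxor (PySem.Int.band e f) (PySem.Int.band (Int.not e) g)
              let t1 := PySem.Int.band (h + s1 + ch + PySem.List.pyGetD shaKs j 0 + PySem.List.pyGetD w j 0) 0xFFFFFFFF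
              let s0 := PySem.Int.bxor (PySem.Int.bxor (shaRotr a 2) (shaRotr a 13)) (shaRotr a 22)
              let maj := PySem.Int.bxor (PySem.Int.bxor (PySem.Int.band a b) (PySem.Int.band a c)) (PySem.Int.band b c)
              let t2 := PySem.Int.band (s0 + maj) 0xFFFFFFFF
              (PySem.Int.band (t1 + t2) 0xFFFFFFFF, a, b, c, PySem.Int.band (d + t1) 0xFFFFFFFF, e, f, g, w))
            (h0, h1, h2, h3, h4, h5, h6, h7, w)
        let (a, b, c, d, e, f, g, h, w) := st2
        (PySem.Int.band (h0 + a) 0xFFFFFFFF, PySem.Int.band (h1 + b) 0xFFFFFFFF,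
         PySem.Int.band (h2 + c) 0xFFFFFFFF, PySem.Int.band (h3 + d) 0xFFFFFFFF,
         PySem.Int.band (h4 + e) 0xFFFFFFFF, PySem.Int.band (h5 + f) 0xFFFFFFFF,
         PySem.Int.band (h6 + g) 0xFFFFFFFF, PySem.Int.band (h7 + h) 0xFFFFFFFF, w))
      ((0x6a09e667 : Int), 0xbb67ae85, 0x3c6ef372, 0xa54ff53a, 0x510e527f, 0x9b05688c, 0x1f83d9ab, 0x5be0cd19,
       List.replicate 64 (0 : Int))
  let (h0, h1, h2, h3, h4, h5, h6, h7, _) := st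
  lebeA (int2bytesA h0 4) ++ lebeA (int2bytesA h1 4) ++ lebeA (int2bytesA h2 4) ++ lebeA (int2bytesA h3 4) ++
  lebeA (int2bytesA h4 4) ++ lebeA (int2bytesA h5 4) ++ lebeA (int2bytesA h6 4) ++ lebeA (int2bytesA h7 4)

-- ===== PORT B =====
-- _be(x, n): the n big-endian bytes of x, by recursion on n
def shaBe (x : Int) : Nat → List Int
  | 0 => []
  | n + 1 => shaBe (x >>> (8 : Nat)) n ++ [PySem.Int.band x 0xFF]

-- _words(c): pack every 4-byte group big-endian ('len(c) < 4' is the no-4-heads pattern; c[4:] is rest)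
def shaWords : List Int → List Int
  | b0 :: b1 :: b2 :: b3 :: rest =>
      (((b0 * 256 + b1) * 256 + b2) * 256 + b3) :: shaWords rest
  | _ => []

-- _extend(w): grow the 16 chunk words to the full 64-entry schedule (w[-k] is pyGetD w (-k))
def shaExtend (w : List Int) : List Int :=
  if _h : w.length < 0x40 then
    let x := PySem.List.pyGetD w (-15) 0
    let y := PySem.List.pyGetD w (-2) 0
    let s0 := PySem.Int.bxor (PySem.Int.bxor (shaRotr x 7) (shaRotr x 18)) (x >>> (3 : Nat))
    let s1 := PySem.Int.bxor (PySem.Int.bxor (shaRotr y 17) (shaRotr y 19)) (y >>> (10 : Nat))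
    shaExtend (w ++ [PySem.Int.band (PySem.List.pyGetD w (-16) 0 + s0 + PySem.List.pyGetD w (-7) 0 + s1) 0xFFFFFFFF])
  else w
termination_by 0x40 - w.length
decreasing_by simp; omega

-- _crunch(ks, w, st): one compression step per remaining round constant (w[0] is pyGetD w 0; w[1:] is drop 1)
def shaCrunch : List Int → List Int → Int × Int × Int × Int × Int × Int × Int × Int →
    Int × Int × Int × Int × Int × Int × Int × Int
  | [], _, st => st
  | kv :: kt, w, st =>
      let (a, b, c, d, e, f, g, h) := st
      let wv := PySem.List.pyGetD w 0 0
      let s1 := PySem.Int.bxor (PySem.Int.bxor (shaRotr e 6) (shaRotr e 11)) (shaRotr e 25)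
      let ch := PySem.Int.bxor (PySem.Int.band e f) (PySem.Int.band (Int.not e) g)
      let t1 := PySem.Int.band (h + s1 + ch + kv + wv) 0xFFFFFFFF
      let s0 := PySem.Int.bxor (PySem.Int.bxor (shaRotr a 2) (shaRotr a 13)) (shaRotr a 22)
      let maj := PySem.Int.bxor (PySem.Int.bxor (PySem.Int.band a b) (PySem.Int.band a c)) (PySem.Int.band b c)
      let t2 := PySem.Int.band (s0 + maj) 0xFFFFFFFF
      shaCrunch kt (w.drop 1)
        (PySem.Int.band (t1 + t2) 0xFFFFFFFF, a, b, c, PySem.Int.band (d + t1) 0xFFFFFFFF, e, f, g)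

def sha256bytes_alt (bytes : List Int) (rounds : Int) : List Int :=
  let data := bytes ++ [(0x80 : Int)]
      ++ List.replicate (PySem.Int.mod (-((bytes.length : Int) + 9)) 0x40).toNat (0 : Int)
      ++ shaBe ((bytes.length : Int) <<< (3 : Nat)) 8
  let steps : Int := min 0x40 (max rounds 0)
  let hs :=
    (PySem.List.pyRange 0 (data.length : Int) 0x40).foldl
      (fun (hs : List Int) (off : Int) =>
        let w := shaExtend (shaWords (PySem.List.slice data (some off) (some (off + 0x40))))
        let v := shaCrunch (PySem.List.slice shaKs none (some steps)) w
          (PySem.List.pyGetD hs 0 0, PySem.List.pyGetD hs 1 0, PySem.List.pyGetD hs 2 0,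
           PySem.List.pyGetD hs 3 0, PySem.List.pyGetD hs 4 0, PySem.List.pyGetD hs 5 0,
           PySem.List.pyGetD hs 6 0, PySem.List.pyGetD hs 7 0)
        List.zipWith (fun p q => PySem.Int.band (p + q) 0xFFFFFFFF) hs
          [v.1, v.2.1, v.2.2.1, v.2.2.2.1, v.2.2.2.2.1, v.2.2.2.2.2.1, v.2.2.2.2.2.2.1, v.2.2.2.2.2.2.2])
      [(0x6a09e667 : Int), 0xbb67ae85, 0x3c6ef372, 0xa54ff53a, 0x510e527f, 0x9b05688c, 0x1f83d9ab, 0x5be0cd19]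
  hs.flatMap (fun x => shaBe x 4)

-- ===== PRECONDITION & SPEC =====
def Spec_sha256bytes (bytes : List Int) (rounds : Int) (out : List Int) : Prop := out = sha256bytes_alt bytes rounds
instance (bytes : List Int) (rounds : Int) (out : List Int) : Decidable (Spec_sha256bytes bytes rounds out) := by unfold Spec_sha256bytes; infer_instance

-- ===== CLAIM (what is proved, stated in full; the proofs are below) =====
def Claim_equal_sha256bytes : Prop := ∀ (bytes : List Int) (rounds : Int), Dom_sha256bytes bytes rounds → Spec_sha256bytes bytes rounds (sha256bytes bytes rounds)

-- ===== LEMMAS AND PROOFS =====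

-- proof-only helpers: named forms of the anonymous loop bodies of the two ports

def pvJoin (t : Int × Int × Int × Int × Int × Int × Int × Int) (w : List Int) :
    Int × Int × Int × Int × Int × Int × Int × Int × List Int :=
  (t.1, t.2.1, t.2.2.1, t.2.2.2.1, t.2.2.2.2.1, t.2.2.2.2.2.1, t.2.2.2.2.2.2.1, t.2.2.2.2.2.2.2, w)

def pvSched (x y p q : Int) : Int :=
  PySem.Int.band
    (p + PySem.Int.bxor (PySem.Int.bxor (shaRotr x 7) (shaRotr x 18)) (x >>> (3 : Nat))
       + q + PySem.Int.bxor (PySem.Int.bxor (shaRotr y 17) (shaRotr y 19)) (y >>> (10 : Nat))) 0xFFFFFFFF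

def pvComp (wv kv : Int) (st : Int × Int × Int × Int × Int × Int × Int × Int) :
    Int × Int × Int × Int × Int × Int × Int × Int :=
  let (a, b, c, d, e, f, g, h) := st
  let s1 := PySem.Int.bxor (PySem.Int.bxor (shaRotr e 6) (shaRotr e 11)) (shaRotr e 25)
  let ch := PySem.Int.bxor (PySem.Int.band e f) (PySem.Int.band (Int.not e) g)
  let t1 := PySem.Int.band (h + s1 + ch + kv + wv) 0xFFFFFFFF
  let s0 := PySem.Int.bxor (PySem.Int.bxor (shaRotr a 2) (shaRotr a 13)) (shaRotr a 22)
  let maj := PySem.Int.bxor (PySem.Int.bxor (PySem.Int.band a b) (PySem.Int.band a c)) (PySem.Int.band b c)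
  let t2 := PySem.Int.band (s0 + maj) 0xFFFFFFFF
  (PySem.Int.band (t1 + t2) 0xFFFFFFFF, a, b, c, PySem.Int.band (d + t1) 0xFFFFFFFF, e, f, g)

def pvStepA (chunk : List Int) (st2 : Int × Int × Int × Int × Int × Int × Int × Int × List Int) (j : Int) :
    Int × Int × Int × Int × Int × Int × Int × Int × List Int :=
  let (a, b, c, d, e, f, g, h, w) := st2
  let wj : Int :=
    if 0x10 ≤ j then
      pvSched (PySem.List.pyGetD w (j - 15) 0) (PySem.List.pyGetD w (j - 2) 0)
        (PySem.List.pyGetD w (j - 16) 0) (PySem.List.pyGetD w (j - 7) 0)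
    else
      bytes2intA (lebeA (PySem.List.slice chunk (some (j <<< (2 : Nat))) (some ((j + 1) <<< (2 : Nat)))))
  let w' := PySem.List.pySetD w j wj
  pvJoin (pvComp (PySem.List.pyGetD w' j 0) (PySem.List.pyGetD shaKs j 0) (a, b, c, d, e, f, g, h)) w'

def pvOutA (rounds : Int) (bs : List Int) (st : Int × Int × Int × Int × Int × Int × Int × Int × List Int)
    (i : Int) : Int × Int × Int × Int × Int × Int × Int × Int × List Int :=
  let (h0, h1, h2, h3, h4, h5, h6, h7, w) := st
  let chunk := PySem.List.slice bs (some (i <<< (6 : Nat))) (some ((i + 1) <<< (6 : Nat)))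
  let st2 := (PySem.List.pyRange 0 (min 0x40 rounds) 1).foldl (pvStepA chunk) (h0, h1, h2, h3, h4, h5, h6, h7, w)
  let (a, b, c, d, e, f, g, h, w') := st2
  (PySem.Int.band (h0 + a) 0xFFFFFFFF, PySem.Int.band (h1 + b) 0xFFFFFFFF,
   PySem.Int.band (h2 + c) 0xFFFFFFFF, PySem.Int.band (h3 + d) 0xFFFFFFFF,
   PySem.Int.band (h4 + e) 0xFFFFFFFF, PySem.Int.band (h5 + f) 0xFFFFFFFF,
   PySem.Int.band (h6 + g) 0xFFFFFFFF, PySem.Int.band (h7 + h) 0xFFFFFFFF, w')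

def pvOutB (steps : Int) (data : List Int) (hs : List Int) (off : Int) : List Int :=
  let w := shaExtend (shaWords (PySem.List.slice data (some off) (some (off + 0x40))))
  let v := shaCrunch (PySem.List.slice shaKs none (some steps)) w
    (PySem.List.pyGetD hs 0 0, PySem.List.pyGetD hs 1 0, PySem.List.pyGetD hs 2 0,
     PySem.List.pyGetD hs 3 0, PySem.List.pyGetD hs 4 0, PySem.List.pyGetD hs 5 0,
     PySem.List.pyGetD hs 6 0, PySem.List.pyGetD hs 7 0)
  List.zipWith (fun p q => PySem.Int.band (p + q) 0xFFFFFFFF) hs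
    [v.1, v.2.1, v.2.2.1, v.2.2.2.1, v.2.2.2.2.1, v.2.2.2.2.2.1, v.2.2.2.2.2.2.1, v.2.2.2.2.2.2.2]

def pvPadA (bytes : List Int) : List Int :=
  ((bytes ++ [0x80]) ++ List.replicate (PySem.Int.band (0x38 - ((bytes ++ [0x80]).length : Int)) 0x3F).toNat 0)
    ++ lebeA (int2bytesA ((bytes.length : Int) <<< (3 : Nat)) 8)

def pvPadB (bytes : List Int) : List Int :=
  bytes ++ [(0x80 : Int)]
    ++ List.replicate (PySem.Int.mod (-((bytes.length : Int) + 9)) 0x40).toNat (0 : Int)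
    ++ shaBe ((bytes.length : Int) <<< (3 : Nat)) 8

def pvInit8 : Int × Int × Int × Int × Int × Int × Int × Int :=
  (0x6a09e667, 0xbb67ae85, 0x3c6ef372, 0xa54ff53a, 0x510e527f, 0x9b05688c, 0x1f83d9ab, 0x5be0cd19)

def pvToL (t : Int × Int × Int × Int × Int × Int × Int × Int) : List Int :=
  [t.1, t.2.1, t.2.2.1, t.2.2.2.1, t.2.2.2.2.1, t.2.2.2.2.2.1, t.2.2.2.2.2.2.1, t.2.2.2.2.2.2.2]

-- the two ports, restated through the named helpers (definitional)
lemma sha256bytes_def (bytes : List Int) (rounds : Int) :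
    sha256bytes bytes rounds =
      (let st := (PySem.List.pyRange 0 (((pvPadA bytes).length : Int) >>> (6 : Nat)) 1).foldl
        (pvOutA rounds (pvPadA bytes)) (pvJoin pvInit8 (List.replicate 64 (0 : Int)))
       lebeA (int2bytesA st.1 4) ++ lebeA (int2bytesA st.2.1 4) ++ lebeA (int2bytesA st.2.2.1 4) ++
       lebeA (int2bytesA st.2.2.2.1 4) ++ lebeA (int2bytesA st.2.2.2.2.1 4) ++
       lebeA (int2bytesA st.2.2.2.2.2.1 4) ++ lebeA (int2bytesA st.2.2.2.2.2.2.1 4) ++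
       lebeA (int2bytesA st.2.2.2.2.2.2.2.1 4)) := rfl

lemma sha256bytes_alt_def (bytes : List Int) (rounds : Int) :
    sha256bytes_alt bytes rounds =
      ((PySem.List.pyRange 0 ((pvPadB bytes).length : Int) 0x40).foldl
        (pvOutB (min 0x40 (max rounds 0)) (pvPadB bytes)) (pvToL pvInit8)).flatMap
        (fun x => shaBe x 4) := rfl

lemma pvBand63 (a : Int) : PySem.Int.band a 63 = a % 64 := by
  unfold PySem.Int.band
  split_ifs with h1 h2 h2
  · simp only [show (63 : Int).toNat = 63 from rfl]
    have h : a.toNat &&& 63 = a.toNat % 64 := by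
      simpa using Nat.and_two_pow_sub_one_eq_mod a.toNat 6
    rw [h]; omega
  · omega
  · simp only [show (63 : Int).toNat = 63 from rfl]
    have h : 63 &&& (-a - 1).toNat = (-a - 1).toNat % 64 := by
      rw [Nat.and_comm]
      simpa using Nat.and_two_pow_sub_one_eq_mod (-a - 1).toNat 6
    rw [h]; omega
  · omega

lemma pvOut4 (x : Int) : lebeA (int2bytesA x 4) =
    [PySem.Int.band (x >>> (24 : Nat)) 0xFF, PySem.Int.band (x >>> (16 : Nat)) 0xFF,
     PySem.Int.band (x >>> (8 : Nat)) 0xFF, PySem.Int.band x 0xFF] := by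
  simp [lebeA, int2bytesA, show PySem.List.pyRange 0 4 1 = [0, 1, 2, 3] from by decide,
        show PySem.List.pyRange 0 ((4 : Int) >>> (1 : Nat)) 1 = [0, 1] from by decide,
        PySem.List.pySetD, PySem.List.pySet?, PySem.List.pyGetD, PySem.List.pyGet?, PySem.List.pyIdx?,
        List.replicate, ← Int.shiftRight_add]

lemma pvBe4_eq (x : Int) : shaBe x 4 = lebeA (int2bytesA x 4) := by
  rw [pvOut4]
  simp [shaBe, ← Int.shiftRight_add]

lemma pvBe8_eq (x : Int) : shaBe x 8 = lebeA (int2bytesA x 8) := by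
  simp [lebeA, int2bytesA, show PySem.List.pyRange 0 8 1 = [0, 1, 2, 3, 4, 5, 6, 7] from by decide,
        show PySem.List.pyRange 0 ((8 : Int) >>> (1 : Nat)) 1 = [0, 1, 2, 3] from by decide,
        PySem.List.pySetD, PySem.List.pySet?, PySem.List.pyGetD, PySem.List.pyGet?, PySem.List.pyIdx?,
        List.replicate, shaBe, ← Int.shiftRight_add]

lemma pvPad_eq (bytes : List Int) : pvPadA bytes = pvPadB bytes := by
  unfold pvPadA pvPadB
  rw [pvBe8_eq]
  simp only [List.append_assoc, List.length_append, List.length_cons, List.length_nil]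
  congr 3
  · congr 1
    rw [pvBand63, PySem.Int.mod_eq_emod_of_pos (by norm_num)]
    push_cast
    omega

lemma pvPad_len (bytes : List Int) : ∃ K : Nat, (pvPadB bytes).length = 64 * K := by
  unfold pvPadB
  rw [pvBe8_eq]
  have h8 : (lebeA (int2bytesA ((bytes.length : Int) <<< (3 : Nat)) 8)).length = 8 := by
    rw [← pvBe8_eq]; rfl
  rw [PySem.Int.mod_eq_emod_of_pos (by norm_num)]
  refine ⟨(bytes.length + 9 + ((-((bytes.length : Int) + 9)) % 64).toNat) / 64, ?_⟩
  simp only [List.length_append, List.length_cons, List.length_nil, List.length_replicate, h8]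
  omega

lemma pvBe4 (d0 d1 d2 d3 : Int) :
    bytes2intA (lebeA [d0, d1, d2, d3]) = ((d0 * 256 + d1) * 256 + d2) * 256 + d3 := by
  simp [lebeA, bytes2intA, show PySem.List.pyRange 0 4 1 = [0, 1, 2, 3] from by decide,
        show PySem.List.pyRange 0 ((4 : Int) >>> (1 : Nat)) 1 = [0, 1] from by decide,
        PySem.List.pySetD, PySem.List.pySet?, PySem.List.pyGetD, PySem.List.pyGet?, PySem.List.pyIdx?,
        Int.shiftLeft_eq]

lemma pvWords_length (c : List Int) : (shaWords c).length = c.length / 4 := by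
  induction c using shaWords.induct with
  | case1 b0 b1 b2 b3 rest ih => simp [shaWords, ih]; omega
  | case2 c h => cases c with
    | nil => rfl
    | cons a t => cases t with
      | nil => simp [shaWords]
      | cons a2 t2 => cases t2 with
        | nil => simp [shaWords]
        | cons a3 t3 => cases t3 with
          | nil => simp [shaWords]
          | cons a4 t4 => exact absurd rfl (h a a2 a3 a4 t4)

lemma pvGetD_fin (l : List Int) (n : Nat) (h : n < l.length) : l[n] = l.getD n 0 :=
  (List.getD_eq_getElem l 0 h).symm

lemma pvTake4 (l : List Int) (h : 4 ≤ l.length) :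
    l.take 4 = [l.getD 0 0, l.getD 1 0, l.getD 2 0, l.getD 3 0] := by
  match l, h with
  | b0 :: b1 :: b2 :: b3 :: rest, _ => simp

lemma pvWords_getD : ∀ (c : List Int) (j : Nat), 4 * j + 4 ≤ c.length →
    (shaWords c).getD j 0 =
      ((((c.drop (4 * j)).getD 0 0 * 256 + (c.drop (4 * j)).getD 1 0) * 256
        + (c.drop (4 * j)).getD 2 0) * 256 + (c.drop (4 * j)).getD 3 0) := by
  intro c
  induction c using shaWords.induct with
  | case1 b0 b1 b2 b3 rest ih =>
    intro j hj
    cases j with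
    | zero => simp [shaWords]
    | succ j =>
      rw [show 4 * (j + 1) = 4 * j + 1 + 1 + 1 + 1 from by ring]
      simp only [List.drop_succ_cons]
      rw [show (shaWords (b0 :: b1 :: b2 :: b3 :: rest)).getD (j + 1) 0
            = (shaWords rest).getD j 0 from by simp [shaWords]]
      exact ih j (by simp at hj; omega)
  | case2 c h =>
    intro j hj
    exfalso
    cases c with
    | nil => simp at hj
    | cons a t => cases t with
      | nil => simp at hj
      | cons a2 t2 => cases t2 with
        | nil => simp at hj
        | cons a3 t3 => cases t3 with
          | nil => simp at hj
          | cons a4 t4 => exact h a a2 a3 a4 t4 rfl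

lemma pvExtend_spec : ∀ (n : Nat) (w : List Int), w.length + n = 64 → 16 ≤ w.length →
    (shaExtend w).length = 64 ∧
    (∀ j : Nat, j < w.length → (shaExtend w).getD j 0 = w.getD j 0) ∧
    (∀ j : Nat, 16 ≤ j → w.length ≤ j → j < 64 →
      (shaExtend w).getD j 0 = pvSched ((shaExtend w).getD (j - 15) 0) ((shaExtend w).getD (j - 2) 0)
        ((shaExtend w).getD (j - 16) 0) ((shaExtend w).getD (j - 7) 0)) := by
  intro n
  induction n with
  | zero =>
    intro w hlen h16
    have he : shaExtend w = w := by rw [shaExtend]; rw [dif_neg (by omega)]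
    rw [he]
    exact ⟨by omega, fun j hj => rfl, fun j _ h2 h3 => by omega⟩
  | succ n ih =>
    intro w hlen h16
    have hlt : w.length < 64 := by omega
    have hstep : shaExtend w = shaExtend (w ++
        [pvSched (w.getD (w.length - 15) 0) (w.getD (w.length - 2) 0)
          (w.getD (w.length - 16) 0) (w.getD (w.length - 7) 0)]) := by
      rw [shaExtend]
      rw [dif_pos hlt]
      rw [PySem.List.pyGetD_neg_ofNat w 15 0 (by omega) (by omega),
          PySem.List.pyGetD_neg_ofNat w 2 0 (by omega) (by omega),
          PySem.List.pyGetD_neg_ofNat w 16 0 (by omega) (by omega),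
          PySem.List.pyGetD_neg_ofNat w 7 0 (by omega) (by omega),
          pvGetD_fin w (w.length - 15) (by omega), pvGetD_fin w (w.length - 2) (by omega),
          pvGetD_fin w (w.length - 16) (by omega), pvGetD_fin w (w.length - 7) (by omega)]
      rfl
    set v := pvSched (w.getD (w.length - 15) 0) (w.getD (w.length - 2) 0)
      (w.getD (w.length - 16) 0) (w.getD (w.length - 7) 0) with hv
    obtain ⟨L, P, R⟩ := ih (w ++ [v]) (by simp; omega) (by simp; omega)
    refine ⟨by rw [hstep]; exact L, ?_, ?_⟩
    · intro j hj
      rw [hstep, P j (by simp; omega), List.getD_append _ _ _ _ (by omega)]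
    · intro j h16j htj hj64
      rcases Nat.lt_or_ge j (w.length + 1) with hjt | hjt
      · have hjj : j = w.length := by omega
        rw [hstep, P j (by simp; omega)]
        have hvv : (w ++ [v]).getD j 0 = v := by
          rw [List.getD_eq_getElem _ 0 (by simp; omega), List.getElem_append_right (by omega)]
          simp [hjj]
        rw [hvv, hv, hjj]
        rw [P (w.length - 15) (by simp), P (w.length - 2) (by simp),
            P (w.length - 16) (by simp), P (w.length - 7) (by simp),
            List.getD_append _ _ _ _ (by omega), List.getD_append _ _ _ _ (by omega),
            List.getD_append _ _ _ _ (by omega), List.getD_append _ _ _ _ (by omega)]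
      · rw [hstep]
        exact R j h16j (by simp; omega) hj64

lemma pvWordA (chunk : List Int) (j : Nat) (hj : j < 16) (hc : chunk.length = 64) :
    bytes2intA (lebeA (PySem.List.slice chunk (some ((j : Int) <<< (2 : Nat)))
        (some (((j : Int) + 1) <<< (2 : Nat))))) =
      ((((chunk.drop (4 * j)).getD 0 0 * 256 + (chunk.drop (4 * j)).getD 1 0) * 256
        + (chunk.drop (4 * j)).getD 2 0) * 256 + (chunk.drop (4 * j)).getD 3 0) := by
  have e3 : (j : Int) <<< (2 : Nat) = ((4 * j : Nat) : Int) := by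
    rw [Int.shiftLeft_eq]; push_cast; ring
  have e4 : ((j : Int) + 1) <<< (2 : Nat) = ((4 * j + 4 : Nat) : Int) := by
    rw [Int.shiftLeft_eq]; push_cast; ring
  rw [e3, e4, PySem.List.slice_natCast, show 4 * j + 4 - 4 * j = 4 from by omega,
      pvTake4 (chunk.drop (4 * j)) (by simp [hc]; omega), pvBe4]

lemma pvStep_agree (chunk W : List Int) (_hlen : W.length = 64)
    (hword : ∀ j : Nat, j < 16 → W.getD j 0 =
      bytes2intA (lebeA (PySem.List.slice chunk (some ((j : Int) <<< (2 : Nat))) (some (((j : Int) + 1) <<< (2 : Nat))))))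
    (hrec : ∀ j : Nat, 16 ≤ j → j < 64 →
      W.getD j 0 = pvSched (W.getD (j - 15) 0) (W.getD (j - 2) 0) (W.getD (j - 16) 0) (W.getD (j - 7) 0))
    (k : Nat) (hk : k < 64) (w1 : List Int) (hw1 : w1.length = 64)
    (hagree : ∀ j : Nat, j < k → w1.getD j 0 = W.getD j 0) (t : Int × Int × Int × Int × Int × Int × Int × Int) :
    pvStepA chunk (pvJoin t w1) (k : Int) =
      pvJoin (pvComp (W.getD k 0) (PySem.List.pyGetD shaKs (k : Int) 0) t)
        (PySem.List.pySetD w1 (k : Int) (W.getD k 0)) := by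
  obtain ⟨a, b, c, d, e, f, g, h⟩ := t
  have hwj : (if (0x10 : Int) ≤ (k : Int) then
        pvSched (PySem.List.pyGetD w1 ((k : Int) - 15) 0) (PySem.List.pyGetD w1 ((k : Int) - 2) 0)
          (PySem.List.pyGetD w1 ((k : Int) - 16) 0) (PySem.List.pyGetD w1 ((k : Int) - 7) 0)
      else
        bytes2intA (lebeA (PySem.List.slice chunk (some ((k : Int) <<< (2 : Nat))) (some (((k : Int) + 1) <<< (2 : Nat)))))) =
      W.getD k 0 := by
    rcases Nat.lt_or_ge k 16 with h16 | h16
    · rw [if_neg (by omega)]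
      exact (hword k h16).symm
    · rw [if_pos (by omega),
          show (k : Int) - 15 = ((k - 15 : Nat) : Int) from by omega,
          show (k : Int) - 2 = ((k - 2 : Nat) : Int) from by omega,
          show (k : Int) - 16 = ((k - 16 : Nat) : Int) from by omega,
          show (k : Int) - 7 = ((k - 7 : Nat) : Int) from by omega,
          PySem.List.pyGetD_natCast, PySem.List.pyGetD_natCast, PySem.List.pyGetD_natCast,
          PySem.List.pyGetD_natCast, hagree (k - 15) (by omega), hagree (k - 2) (by omega),
          hagree (k - 16) (by omega), hagree (k - 7) (by omega)]
      exact (hrec k h16 hk).symm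
  show pvJoin (pvComp (PySem.List.pyGetD (PySem.List.pySetD w1 (k : Int) _) (k : Int) 0)
        (PySem.List.pyGetD shaKs (k : Int) 0) (a, b, c, d, e, f, g, h)) (PySem.List.pySetD w1 (k : Int) _) = _
  rw [hwj]
  have hget : PySem.List.pyGetD (PySem.List.pySetD w1 (k : Int) (W.getD k 0)) (k : Int) 0 = W.getD k 0 := by
    rw [PySem.List.pyGetD_pySetD_natCast _ _ _ _ _ (by omega), if_pos rfl]
  rw [hget]

lemma pvInner (chunk W : List Int) (hlen : W.length = 64)
    (hword : ∀ j : Nat, j < 16 → W.getD j 0 =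
      bytes2intA (lebeA (PySem.List.slice chunk (some ((j : Int) <<< (2 : Nat))) (some (((j : Int) + 1) <<< (2 : Nat))))))
    (hrec : ∀ j : Nat, 16 ≤ j → j < 64 →
      W.getD j 0 = pvSched (W.getD (j - 15) 0) (W.getD (j - 2) 0) (W.getD (j - 16) 0) (W.getD (j - 7) 0)) :
    ∀ (n j : Nat), j + n ≤ 64 → ∀ (w1 : List Int), w1.length = 64 →
      (∀ i : Nat, i < j → w1.getD i 0 = W.getD i 0) →
      ∀ (t : Int × Int × Int × Int × Int × Int × Int × Int),
      ∃ w', (PySem.List.pyRange (j : Int) ((j : Int) + (n : Int)) 1).foldl (pvStepA chunk) (pvJoin t w1) =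
              pvJoin (shaCrunch ((shaKs.drop j).take n) (W.drop j) t) w' ∧ w'.length = 64 := by
  have hks : shaKs.length = 64 := rfl
  intro n
  induction n with
  | zero =>
    intro j _ w1 hw1 _ t
    refine ⟨w1, ?_, hw1⟩
    rw [show (j : Int) + ((0 : Nat) : Int) = (j : Int) from by push_cast; ring,
        PySem.List.pyRange_one_eq_nil (le_refl _)]
    simp [shaCrunch]
  | succ n ih =>
    intro j hj w1 hw1 hagree t
    have hcons : PySem.List.pyRange (j : Int) ((j : Int) + ((n + 1 : Nat) : Int)) 1 =
        (j : Int) :: PySem.List.pyRange ((j : Int) + 1) ((j : Int) + ((n + 1 : Nat) : Int)) 1 :=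
      PySem.List.pyRange_one_cons (by push_cast; omega)
    rw [hcons, List.foldl_cons,
        pvStep_agree chunk W hlen hword hrec j (by omega) w1 hw1 hagree t]
    have hksd : shaKs.drop j = shaKs.getD j 0 :: shaKs.drop (j + 1) := by
      rw [List.drop_eq_getElem_cons (by omega), pvGetD_fin shaKs j (by omega)]
    have hWd : W.drop j = W.getD j 0 :: W.drop (j + 1) := by
      rw [List.drop_eq_getElem_cons (by omega), pvGetD_fin W j (by omega)]
    have hcr : shaCrunch ((shaKs.drop j).take (n + 1)) (W.drop j) t =
        shaCrunch ((shaKs.drop (j + 1)).take n) (W.drop (j + 1))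
          (pvComp (W.getD j 0) (shaKs.getD j 0) t) := by
      rw [hksd, hWd, List.take_succ_cons]
      show shaCrunch _ _ (pvComp (PySem.List.pyGetD (W.getD j 0 :: W.drop (j + 1)) 0 0) (shaKs.getD j 0) t) = _
      rw [PySem.List.pyGetD_zero_cons]
      rfl
    rw [hcr]
    have hpy : PySem.List.pyGetD shaKs (j : Int) 0 = shaKs.getD j 0 := PySem.List.pyGetD_natCast shaKs j 0
    rw [hpy]
    have hrange : PySem.List.pyRange ((j : Int) + 1) ((j : Int) + ((n + 1 : Nat) : Int)) 1 =
        PySem.List.pyRange (((j + 1 : Nat) : Int)) (((j + 1 : Nat) : Int) + ((n : Nat) : Int)) 1 := by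
      push_cast; ring_nf
    rw [hrange]
    refine ih (j + 1) (by omega) (PySem.List.pySetD w1 (j : Int) (W.getD j 0))
      (by rw [PySem.List.length_pySetD]; exact hw1) ?_ (pvComp (W.getD j 0) (shaKs.getD j 0) t)
    intro i hi
    rw [← PySem.List.pyGetD_natCast, PySem.List.pyGetD_pySetD_natCast _ _ _ _ _ (by omega)]
    rcases Nat.lt_or_ge i j with hij | hij
    · rw [if_neg (by omega), PySem.List.pyGetD_natCast]
      exact hagree i hij
    · rw [if_pos (by omega)]
      congr 1
      omega

set_option maxHeartbeats 1000000 in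
lemma pvChunkStep (rounds : Int) (data : List Int) (i : Nat) (hi : 64 * (i + 1) ≤ data.length)
    (t0 : Int × Int × Int × Int × Int × Int × Int × Int) (w : List Int) (hw : w.length = 64) :
    ∃ w' T, pvOutA rounds data (pvJoin t0 w) (i : Int) = pvJoin T w' ∧ w'.length = 64 ∧
      pvOutB (min 0x40 (max rounds 0)) data (pvToL t0) (((64 * i : Nat) : Nat) : Int) = pvToL T := by
  obtain ⟨a0, b0, c0, d0, e0, f0, g0, h0⟩ := t0
  have e1 : (i : Int) <<< (6 : Nat) = ((64 * i : Nat) : Int) := by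
    rw [Int.shiftLeft_eq]; push_cast; ring
  have e2 : ((i : Int) + 1) <<< (6 : Nat) = ((64 * i + 64 : Nat) : Int) := by
    rw [Int.shiftLeft_eq]; push_cast; ring
  have e2' : (((64 * i : Nat) : Int) + 0x40) = ((64 * i + 64 : Nat) : Int) := by push_cast; ring
  set chunk := PySem.List.slice data (some ((i : Int) <<< (6 : Nat))) (some (((i : Int) + 1) <<< (6 : Nat))) with hchunk
  have hc : chunk.length = 64 := by
    rw [hchunk, e1, e2, PySem.List.slice_natCast]
    simp only [List.length_take, List.length_drop]
    omega
  set W := shaExtend (shaWords chunk) with hWdef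
  have hwl : (shaWords chunk).length = 16 := by rw [pvWords_length, hc]
  obtain ⟨L, P, R⟩ := pvExtend_spec 48 (shaWords chunk) (by omega) (by omega)
  have hword : ∀ j : Nat, j < 16 → W.getD j 0 =
      bytes2intA (lebeA (PySem.List.slice chunk (some ((j : Int) <<< (2 : Nat)))
        (some (((j : Int) + 1) <<< (2 : Nat))))) := by
    intro j hj
    rw [hWdef, P j (by omega), pvWords_getD chunk j (by omega), pvWordA chunk j hj hc]
  have hrec : ∀ j : Nat, 16 ≤ j → j < 64 →
      W.getD j 0 = pvSched (W.getD (j - 15) 0) (W.getD (j - 2) 0) (W.getD (j - 16) 0) (W.getD (j - 7) 0) := by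
    intro j h1 h2
    exact R j h1 (by omega) h2
  set m := (min (0x40 : Int) rounds).toNat with hmdef
  have hm64 : m ≤ 64 := by omega
  have hm : PySem.List.pyRange 0 (min 0x40 rounds) 1 =
      PySem.List.pyRange (((0 : Nat)) : Int) ((((0 : Nat)) : Int) + ((m : Nat) : Int)) 1 := by
    rcases Classical.em (min (0x40 : Int) rounds ≤ 0) with hle | hpos
    · rw [PySem.List.pyRange_one_eq_nil hle, PySem.List.pyRange_one_eq_nil (by push_cast; omega)]
    · congr 1
      push_cast
      omega
  obtain ⟨w', hfold, hw'⟩ := pvInner chunk W (by rw [hWdef]; exact L) hword hrec m 0 (by omega)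
    w hw (by omega) (a0, b0, c0, d0, e0, f0, g0, h0)
  rw [List.drop_zero, List.drop_zero] at hfold
  set tA := shaCrunch (shaKs.take m) W (a0, b0, c0, d0, e0, f0, g0, h0) with htA
  refine ⟨w', (PySem.Int.band (a0 + tA.1) 0xFFFFFFFF, PySem.Int.band (b0 + tA.2.1) 0xFFFFFFFF,
    PySem.Int.band (c0 + tA.2.2.1) 0xFFFFFFFF, PySem.Int.band (d0 + tA.2.2.2.1) 0xFFFFFFFF,
    PySem.Int.band (e0 + tA.2.2.2.2.1) 0xFFFFFFFF, PySem.Int.band (f0 + tA.2.2.2.2.2.1) 0xFFFFFFFF,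
    PySem.Int.band (g0 + tA.2.2.2.2.2.2.1) 0xFFFFFFFF, PySem.Int.band (h0 + tA.2.2.2.2.2.2.2) 0xFFFFFFFF),
    ?_, hw', ?_⟩
  · show pvOutA rounds data (pvJoin (a0, b0, c0, d0, e0, f0, g0, h0) w) (i : Int) = _
    unfold pvOutA
    dsimp only [pvJoin]
    dsimp only [pvJoin] at hfold
    rw [← hchunk, hm, hfold]
  · show pvOutB (min 0x40 (max rounds 0)) data (pvToL (a0, b0, c0, d0, e0, f0, g0, h0)) ((64 * i : Nat) : Int) = _
    unfold pvOutB
    have hsliceB : PySem.List.slice data (some ((64 * i : Nat) : Int))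
        (some (((64 * i : Nat) : Int) + 0x40)) = chunk := by
      rw [e2', hchunk, e1, e2]
    have htake : PySem.List.slice shaKs none (some (min (0x40 : Int) (max rounds 0))) = shaKs.take m := by
      rw [PySem.List.slice_to shaKs (b := min (0x40 : Int) (max rounds 0)) (by omega)]
      congr 1
      omega
    dsimp only [pvToL]
    rw [hsliceB, htake]
    rfl

lemma pvOuter (rounds : Int) (data : List Int) (K : Nat) (hK : data.length = 64 * K) :
    ∀ (l : List Nat), (∀ k ∈ l, k < K) →
    ∀ (t0 : Int × Int × Int × Int × Int × Int × Int × Int) (w : List Int), w.length = 64 →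
    ∃ w' T, l.foldl (fun st k => pvOutA rounds data st ((k : Nat) : Int)) (pvJoin t0 w) = pvJoin T w' ∧
      w'.length = 64 ∧
      l.foldl (fun hs k => pvOutB (min 0x40 (max rounds 0)) data hs (((64 * k : Nat) : Nat) : Int)) (pvToL t0) = pvToL T := by
  intro l
  induction l with
  | nil => exact fun _ t0 w hw => ⟨w, t0, rfl, hw, rfl⟩
  | cons k l ih =>
    intro hmem t0 w hw
    obtain ⟨w1, T1, hA1, hw1, hB1⟩ :=
      pvChunkStep rounds data k (by have := hmem k (by simp); omega) t0 w hw
    obtain ⟨w', T, hA, hw', hB⟩ := ih (fun x hx => hmem x (by simp [hx])) T1 w1 hw1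
    refine ⟨w', T, ?_, hw', ?_⟩
    · rw [List.foldl_cons, hA1, hA]
    · rw [List.foldl_cons, hB1, hB]

-- ===== VERDICT (by name: the statement is the Claim_ definition above) =====
theorem sha256bytes_spec : Claim_equal_sha256bytes := by
  intro bytes rounds _
  unfold Spec_sha256bytes
  rw [sha256bytes_def, sha256bytes_alt_def, pvPad_eq]
  obtain ⟨K, hK⟩ := pvPad_len bytes
  have hlen : ((pvPadB bytes).length : Int) = ((64 * K : Nat) : Int) := by rw [hK]
  have hA6 : ((pvPadB bytes).length : Int) >>> (6 : Nat) = ((K : Nat) : Int) := by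
    rw [hlen, Int.shiftRight_eq_div_pow]
    push_cast
    omega
  have hr1 : PySem.List.pyRange 0 ((K : Nat) : Int) 1 = (List.range K).map (fun k => ((k : Nat) : Int)) := by
    rw [PySem.List.pyRange_one]
    simp
  have hrB : PySem.List.pyRange 0 ((pvPadB bytes).length : Int) 0x40 =
      (List.range K).map (fun k => (((64 * k : Nat) : Nat) : Int)) := by
    rw [hlen, PySem.List.pyRange_of_pos _ _ (by norm_num)]
    have hcount : (if (0 : Int) < ((64 * K : Nat) : Int) then
        ((((64 * K : Nat) : Int) - 0 + 64 - 1) / 64).toNat else 0) = K := by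
      split_ifs with h
      · push_cast at h ⊢
        omega
      · push_cast at h
        omega
    rw [hcount]
    apply List.map_congr_left
    intro k hk
    push_cast
    ring
  obtain ⟨w', T, hA, _, hB⟩ := pvOuter rounds (pvPadB bytes) K hK (List.range K)
    (fun k hk => List.mem_range.mp hk) pvInit8 (List.replicate 64 (0 : Int)) (by simp)
  rw [hA6, hr1, hrB, List.foldl_map, List.foldl_map, hA, hB]
  dsimp only [pvJoin, pvToL]
  simp [pvBe4_eq]
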